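-- pv_equiv track=rewrite | github.com/exleya/advent_of_code | 2021/day19.py | largest_dist
-- ===== SOURCE A (Python) =====
-- def largest_dist(lst):
--     md = 0
--     for a in lst:
--         for b in lst:
--             if a != b:
--                 dist = abs(a[0] - b[0]) + abs(a[1] - b[1]) + abs(a[2] - b[2])
--                 md = max(md, dist)
--     return md
-- ===== SOURCE B (Python) =====
-- def largest_dist(lst):
--     if not lst:
--         return 0
--     best = 0
--     for s2 in (1, -1):
--         for s3 in (1, -1):
--             vals = [p[0] + s2 * p[1] + s3 * p[2] for p in lst]
--             best = max(best, max(vals) - min(vals))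
--     return best
-- ===== Notes on version B (the rewrite author's own statement) =====
-- stated objective: faster
-- what changed: Replaced the O(n^2) all-pairs Manhattan-distance scan by the classic L1-to-Linf reduction: the answer is the max over the 4 sign combinations (s1 fixed to +1) of (max - min) of the signed coordinate sums, computed in one pass per combination.
-- outside the precondition, e.g. on largest_dist([(1,), (1,)]): A returns 0, B raises IndexError
import Mathlib
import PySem

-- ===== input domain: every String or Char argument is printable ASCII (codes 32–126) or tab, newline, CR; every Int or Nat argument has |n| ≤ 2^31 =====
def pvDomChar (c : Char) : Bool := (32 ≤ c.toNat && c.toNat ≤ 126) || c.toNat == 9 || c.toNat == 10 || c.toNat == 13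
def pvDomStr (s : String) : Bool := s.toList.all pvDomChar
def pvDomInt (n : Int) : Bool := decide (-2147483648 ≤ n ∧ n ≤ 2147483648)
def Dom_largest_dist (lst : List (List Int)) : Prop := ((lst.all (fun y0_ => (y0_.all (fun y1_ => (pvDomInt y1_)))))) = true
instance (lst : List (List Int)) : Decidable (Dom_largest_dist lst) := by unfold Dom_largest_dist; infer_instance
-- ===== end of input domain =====

-- B replaces A's O(n^2) all-pairs Manhattan scan by the L1/Linf reduction: max over 4 sign
-- combinations of (max - min) of the signed coordinate sums, one pass each (O(n)).

-- ===== PORT A =====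
-- the distance expression of A's inner loop (a[0..2], b[0..2] are in range under Pre_)
def d3 (a b : List Int) : Int :=
  |PySem.List.pyGetD a 0 0 - PySem.List.pyGetD b 0 0| +
  |PySem.List.pyGetD a 1 0 - PySem.List.pyGetD b 1 0| +
  |PySem.List.pyGetD a 2 0 - PySem.List.pyGetD b 2 0|

def largest_dist (lst : List (List Int)) : Int :=
  lst.foldl (fun md a =>
    lst.foldl (fun md b => if a ≠ b then max md (d3 a b) else md) md) 0

-- ===== PORT B =====
-- p[0] + s2*p[1] + s3*p[2], the signed coordinate sum of Source B's comprehension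
def sgnSum (s2 s3 : Int) (p : List Int) : Int :=
  PySem.List.pyGetD p 0 0 + s2 * PySem.List.pyGetD p 1 0 + s3 * PySem.List.pyGetD p 2 0

def largest_dist_alt (lst : List (List Int)) : Int :=
  if lst = [] then 0
  else
    [(1 : Int), -1].foldl (fun best s2 =>
      [(1 : Int), -1].foldl (fun best s3 =>
        let vals := lst.map (sgnSum s2 s3)
        max best ((PySem.List.max? vals (fun x => x)).getD 0 -
                  (PySem.List.min? vals (fun x => x)).getD 0)) best) 0

-- ===== PRECONDITION & SPEC =====
-- Pre_ requires every point to have at least 3 coordinates: on shorter points Python A raises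
-- IndexError whenever two list elements differ (and B always reads p[0..2]); A happens to return 0
-- on degenerate short inputs whose elements are all equal, which Pre_ also excludes.
def Pre_largest_dist (lst : List (List Int)) : Prop := ∀ x ∈ lst, 3 ≤ x.length
instance (lst : List (List Int)) : Decidable (Pre_largest_dist lst) := by
  unfold Pre_largest_dist; infer_instance

def pvWitness_largest_dist : List (List Int) := [[0, 0, 0], [1, 2, 3]]

def Spec_largest_dist (lst : List (List Int)) (out : Int) : Prop := out = largest_dist_alt lst
instance (lst : List (List Int)) (out : Int) : Decidable (Spec_largest_dist lst out) := by
  unfold Spec_largest_dist; infer_instance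

-- ===== CLAIM (what is proved, stated in full; the proofs are below) =====
def Claim_equal_largest_dist : Prop :=
  ∀ (lst : List (List Int)), Dom_largest_dist lst → Pre_largest_dist lst →
    Spec_largest_dist lst (largest_dist lst)

-- ===== LEMMAS AND PROOFS =====

-- (max - min) of the signed sums for one sign combination
def Rval (lst : List (List Int)) (s2 s3 : Int) : Int :=
  (PySem.List.max? (lst.map (sgnSum s2 s3)) (fun x => x)).getD 0 -
  (PySem.List.min? (lst.map (sgnSum s2 s3)) (fun x => x)).getD 0

lemma alt_eq (lst : List (List Int)) (h : lst ≠ []) :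
    largest_dist_alt lst =
      max (max (max (max 0 (Rval lst 1 1)) (Rval lst 1 (-1))) (Rval lst (-1) 1))
        (Rval lst (-1) (-1)) := by
  simp only [largest_dist_alt, if_neg h, List.foldl, Rval]

-- ---- inner loop of A ----
lemma inner_le (a : List Int) (l : List (List Int)) :
    ∀ md : Int, md ≤ l.foldl (fun md b => if a ≠ b then max md (d3 a b) else md) md := by
  induction l with
  | nil => intro md; simp
  | cons c t ih =>
    intro md
    simp only [List.foldl]
    refine le_trans ?_ (ih _)
    split
    · exact le_max_left _ _
    · exact le_refl _

lemma inner_ge (a : List Int) (l : List (List Int)) :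
    ∀ md : Int, ∀ b ∈ l, a ≠ b →
      d3 a b ≤ l.foldl (fun md b => if a ≠ b then max md (d3 a b) else md) md := by
  induction l with
  | nil => intro md b hb; exact absurd hb (List.not_mem_nil)
  | cons c t ih =>
    intro md b hb hab
    simp only [List.foldl]
    rcases List.mem_cons.mp hb with rfl | hb'
    · refine le_trans ?_ (inner_le a t _)
      simp [if_pos hab]
    · exact ih _ b hb' hab

lemma inner_mem (a : List Int) (l : List (List Int)) :
    ∀ md : Int,
      l.foldl (fun md b => if a ≠ b then max md (d3 a b) else md) md = md ∨
      ∃ b ∈ l, a ≠ b ∧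
        l.foldl (fun md b => if a ≠ b then max md (d3 a b) else md) md = d3 a b := by
  induction l with
  | nil => intro md; left; rfl
  | cons c t ih =>
    intro md
    simp only [List.foldl]
    rcases ih (if a ≠ c then max md (d3 a c) else md) with h | ⟨b, hb, hab, h⟩
    · by_cases hac : a ≠ c
      · rw [if_pos hac] at h
        rw [if_pos hac]
        rcases max_choice md (d3 a c) with hm | hm
        · left; exact h.trans hm
        · right; exact ⟨c, List.mem_cons_self, hac, h.trans hm⟩
      · rw [if_neg hac] at h
        left; rw [if_neg hac]; exact h
    · right; exact ⟨b, List.mem_cons_of_mem _ hb, hab, h⟩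

-- ---- outer loop of A ----
lemma outer_le (lst : List (List Int)) (l : List (List Int)) :
    ∀ md : Int, md ≤ l.foldl (fun md a =>
      lst.foldl (fun md b => if a ≠ b then max md (d3 a b) else md) md) md := by
  induction l with
  | nil => intro md; simp
  | cons c t ih =>
    intro md
    simp only [List.foldl]
    exact le_trans (inner_le c lst md) (ih _)

lemma outer_ge (lst : List (List Int)) (l : List (List Int)) :
    ∀ md : Int, ∀ a ∈ l, ∀ b ∈ lst, a ≠ b →
      d3 a b ≤ l.foldl (fun md a =>
        lst.foldl (fun md b => if a ≠ b then max md (d3 a b) else md) md) md := by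
  induction l with
  | nil => intro md a ha; exact absurd ha (List.not_mem_nil)
  | cons c t ih =>
    intro md a ha b hb hab
    simp only [List.foldl]
    rcases List.mem_cons.mp ha with rfl | ha'
    · exact le_trans (inner_ge a lst md b hb hab) (outer_le lst t _)
    · exact ih _ a ha' b hb hab

lemma outer_mem (lst : List (List Int)) (l : List (List Int)) :
    ∀ md : Int,
      l.foldl (fun md a =>
        lst.foldl (fun md b => if a ≠ b then max md (d3 a b) else md) md) md = md ∨
      ∃ a ∈ l, ∃ b ∈ lst, a ≠ b ∧
        l.foldl (fun md a =>
          lst.foldl (fun md b => if a ≠ b then max md (d3 a b) else md) md) md = d3 a b := by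
  induction l with
  | nil => intro md; left; rfl
  | cons c t ih =>
    intro md
    simp only [List.foldl]
    rcases ih (lst.foldl (fun md b => if c ≠ b then max md (d3 c b) else md) md) with h | h
    · rcases inner_mem c lst md with h' | ⟨b, hb, hcb, h'⟩
      · left; rw [h, h']
      · right; exact ⟨c, List.mem_cons_self, b, hb, hcb, by rw [h, h']⟩
    · obtain ⟨a, ha, b, hb, hab, h⟩ := h
      right; exact ⟨a, List.mem_cons_of_mem _ ha, b, hb, hab, h⟩

-- ---- properties of Rval ----
lemma Rval_ge (lst : List (List Int)) (s2 s3 : Int) (p q : List Int)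
    (hp : p ∈ lst) (hq : q ∈ lst) :
    sgnSum s2 s3 p - sgnSum s2 s3 q ≤ Rval lst s2 s3 := by
  have hne : lst.map (sgnSum s2 s3) ≠ [] := by
    simp only [ne_eq, List.map_eq_nil_iff]
    rintro rfl; exact absurd hp (List.not_mem_nil)
  rcases hm : PySem.List.max? (lst.map (sgnSum s2 s3)) (fun x => x) with _ | m
  · exact absurd ((PySem.List.max?_eq_none_iff _ _).mp hm) hne
  rcases hmi : PySem.List.min? (lst.map (sgnSum s2 s3)) (fun x => x) with _ | mi
  · exact absurd ((PySem.List.min?_eq_none_iff _ _).mp hmi) hne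
  have h1 : sgnSum s2 s3 p ≤ m :=
    PySem.List.max?_isMax hm _ (List.mem_map_of_mem hp)
  have h2 : mi ≤ sgnSum s2 s3 q :=
    PySem.List.min?_isMin hmi _ (List.mem_map_of_mem hq)
  simp only [Rval, hm, hmi, Option.getD_some]
  omega

lemma Rval_attained (lst : List (List Int)) (s2 s3 : Int) (h : lst ≠ []) :
    ∃ p ∈ lst, ∃ q ∈ lst, Rval lst s2 s3 = sgnSum s2 s3 p - sgnSum s2 s3 q := by
  have hne : lst.map (sgnSum s2 s3) ≠ [] := by
    simp only [ne_eq, List.map_eq_nil_iff]; exact h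
  rcases hm : PySem.List.max? (lst.map (sgnSum s2 s3)) (fun x => x) with _ | m
  · exact absurd ((PySem.List.max?_eq_none_iff _ _).mp hm) hne
  rcases hmi : PySem.List.min? (lst.map (sgnSum s2 s3)) (fun x => x) with _ | mi
  · exact absurd ((PySem.List.min?_eq_none_iff _ _).mp hmi) hne
  obtain ⟨p, hp, hpm⟩ := List.mem_map.mp (PySem.List.max?_mem hm)
  obtain ⟨q, hq, hqm⟩ := List.mem_map.mp (PySem.List.min?_mem hmi)
  refine ⟨p, hp, q, hq, ?_⟩
  simp only [Rval, hm, hmi, Option.getD_some]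
  rw [hpm, hqm]

lemma Rval_le_A (lst : List (List Int)) (s2 s3 : Int)
    (hs2 : s2 = 1 ∨ s2 = -1) (hs3 : s3 = 1 ∨ s3 = -1) (h : lst ≠ []) :
    Rval lst s2 s3 ≤ largest_dist lst := by
  obtain ⟨p, hp, q, hq, hR⟩ := Rval_attained lst s2 s3 h
  rw [hR]
  by_cases hpq : p = q
  · subst hpq
    simp only [sub_self]
    exact outer_le lst lst 0
  · refine le_trans ?_ (outer_ge lst lst 0 p hp q hq hpq)
    simp only [sgnSum, d3]
    have t0 := le_abs_self (PySem.List.pyGetD p 0 0 - PySem.List.pyGetD q 0 0)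
    have t1 := le_abs_self (PySem.List.pyGetD p 1 0 - PySem.List.pyGetD q 1 0)
    have t1' := neg_abs_le (PySem.List.pyGetD p 1 0 - PySem.List.pyGetD q 1 0)
    have t2 := le_abs_self (PySem.List.pyGetD p 2 0 - PySem.List.pyGetD q 2 0)
    have t2' := neg_abs_le (PySem.List.pyGetD p 2 0 - PySem.List.pyGetD q 2 0)
    rcases hs2 with rfl | rfl <;> rcases hs3 with rfl | rfl <;> nlinarith

-- A's attained distance is bounded by B's value (sign choice + possible swap of the pair)
lemma d3_le_alt (lst : List (List Int)) (a b : List Int) (ha : a ∈ lst) (hb : b ∈ lst) :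
    d3 a b ≤ largest_dist_alt lst := by
  have h : lst ≠ [] := by rintro rfl; exact absurd ha (List.not_mem_nil)
  rw [alt_eq lst h]
  set x0 := PySem.List.pyGetD a 0 0 with hx0
  set x1 := PySem.List.pyGetD a 1 0 with hx1
  set x2 := PySem.List.pyGetD a 2 0 with hx2
  set y0 := PySem.List.pyGetD b 0 0 with hy0
  set y1 := PySem.List.pyGetD b 1 0 with hy1
  set y2 := PySem.List.pyGetD b 2 0 with hy2
  have key : ∀ s2 s3 : Int, (s2 = 1 ∨ s2 = -1) → (s3 = 1 ∨ s3 = -1) →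
      ∀ p q : List Int, p ∈ lst → q ∈ lst →
      d3 a b = sgnSum s2 s3 p - sgnSum s2 s3 q →
      d3 a b ≤ max (max (max (max 0 (Rval lst 1 1)) (Rval lst 1 (-1))) (Rval lst (-1) 1))
          (Rval lst (-1) (-1)) := by
    intro s2 s3 hs2 hs3 p q hp hq heq
    have hR : d3 a b ≤ Rval lst s2 s3 := heq ▸ Rval_ge lst s2 s3 p q hp hq
    rcases hs2 with rfl | rfl <;> rcases hs3 with rfl | rfl <;> omega
  rcases le_or_gt y0 x0 with h0 | h0 <;> rcases le_or_gt y1 x1 with h1 | h1 <;>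
    rcases le_or_gt y2 x2 with h2 | h2
  · exact key 1 1 (Or.inl rfl) (Or.inl rfl) a b ha hb (by
      simp only [d3, sgnSum, ← hx0, ← hx1, ← hx2, ← hy0, ← hy1, ← hy2,
        abs_of_nonneg (sub_nonneg.mpr h0), abs_of_nonneg (sub_nonneg.mpr h1),
        abs_of_nonneg (sub_nonneg.mpr h2)]; ring)
  · exact key 1 (-1) (Or.inl rfl) (Or.inr rfl) a b ha hb (by
      simp only [d3, sgnSum, ← hx0, ← hx1, ← hx2, ← hy0, ← hy1, ← hy2,
        abs_of_nonneg (sub_nonneg.mpr h0), abs_of_nonneg (sub_nonneg.mpr h1),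
        abs_of_neg (sub_neg.mpr h2)]; ring)
  · exact key (-1) 1 (Or.inr rfl) (Or.inl rfl) a b ha hb (by
      simp only [d3, sgnSum, ← hx0, ← hx1, ← hx2, ← hy0, ← hy1, ← hy2,
        abs_of_nonneg (sub_nonneg.mpr h0), abs_of_neg (sub_neg.mpr h1),
        abs_of_nonneg (sub_nonneg.mpr h2)]; ring)
  · exact key (-1) (-1) (Or.inr rfl) (Or.inr rfl) a b ha hb (by
      simp only [d3, sgnSum, ← hx0, ← hx1, ← hx2, ← hy0, ← hy1, ← hy2,
        abs_of_nonneg (sub_nonneg.mpr h0), abs_of_neg (sub_neg.mpr h1),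
        abs_of_neg (sub_neg.mpr h2)]; ring)
  · exact key (-1) (-1) (Or.inr rfl) (Or.inr rfl) b a hb ha (by
      simp only [d3, sgnSum, ← hx0, ← hx1, ← hx2, ← hy0, ← hy1, ← hy2,
        abs_of_neg (sub_neg.mpr h0), abs_of_nonneg (sub_nonneg.mpr h1),
        abs_of_nonneg (sub_nonneg.mpr h2)]; ring)
  · exact key (-1) 1 (Or.inr rfl) (Or.inl rfl) b a hb ha (by
      simp only [d3, sgnSum, ← hx0, ← hx1, ← hx2, ← hy0, ← hy1, ← hy2,
        abs_of_neg (sub_neg.mpr h0), abs_of_nonneg (sub_nonneg.mpr h1),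
        abs_of_neg (sub_neg.mpr h2)]; ring)
  · exact key 1 (-1) (Or.inl rfl) (Or.inr rfl) b a hb ha (by
      simp only [d3, sgnSum, ← hx0, ← hx1, ← hx2, ← hy0, ← hy1, ← hy2,
        abs_of_neg (sub_neg.mpr h0), abs_of_neg (sub_neg.mpr h1),
        abs_of_nonneg (sub_nonneg.mpr h2)]; ring)
  · exact key 1 1 (Or.inl rfl) (Or.inl rfl) b a hb ha (by
      simp only [d3, sgnSum, ← hx0, ← hx1, ← hx2, ← hy0, ← hy1, ← hy2,
        abs_of_neg (sub_neg.mpr h0), abs_of_neg (sub_neg.mpr h1),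
        abs_of_neg (sub_neg.mpr h2)]; ring)

lemma A_le_alt (lst : List (List Int)) : largest_dist lst ≤ largest_dist_alt lst := by
  rcases outer_mem lst lst 0 with h | ⟨a, ha, b, hb, hab, h⟩
  · rw [largest_dist, h]
    by_cases hnil : lst = []
    · subst hnil; simp [largest_dist_alt]
    · rw [alt_eq lst hnil]; omega
  · rw [largest_dist, h]
    exact d3_le_alt lst a b ha hb

lemma alt_le_A (lst : List (List Int)) : largest_dist_alt lst ≤ largest_dist lst := by
  by_cases hnil : lst = []
  · subst hnil; simp [largest_dist_alt, largest_dist]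
  · rw [alt_eq lst hnil]
    have h0 : (0 : Int) ≤ largest_dist lst := outer_le lst lst 0
    have h1 := Rval_le_A lst 1 1 (Or.inl rfl) (Or.inl rfl) hnil
    have h2 := Rval_le_A lst 1 (-1) (Or.inl rfl) (Or.inr rfl) hnil
    have h3 := Rval_le_A lst (-1) 1 (Or.inr rfl) (Or.inl rfl) hnil
    have h4 := Rval_le_A lst (-1) (-1) (Or.inr rfl) (Or.inr rfl) hnil
    omega

-- ===== VERDICT (by name: the statement is the Claim_ definition above) =====
theorem largest_dist_spec : Claim_equal_largest_dist := by
  intro lst _ _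
  exact le_antisymm (A_le_alt lst) (alt_le_A lst)
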